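-- pv_equiv track=rewrite | github.com/RaffaeleFiorillo/Challanges | main.py | check_rect
-- ===== SOURCE A (Python) =====
-- def remove_excess(map):
--     leasts = []
--     index = 0
--     for m in map:
--         while sum(m[index:]) == sum(m):
--             index += 1
--         leasts.append(index-1)
--         index = 0
--     least = min(leasts)
--     map = tuple(tuple(m[least:]) for m in map)
--     return map
--
-- def check_rect(map):
--     map = remove_excess(map)
--     size_map = len(map)
--     sizes = [len(m) for m in map]
--     for m in map:
--         if 0 in m:
--             return 3
--     if max(sizes) == min(sizes):  # check if it is rectangle
--         for size in sizes:
--             if size != size_map:  # check if it is not square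
--                 return 1
--         return 2
--     return 3
-- ===== SOURCE B (Python) =====
-- # B: one O(C) pass per row — count leading zeros directly and check for an
-- # inner zero once, instead of re-summing suffixes (O(C^2) per row) and
-- # materialising trimmed tuples.
--
-- def _lead(m):
--     k = 0
--     while k < len(m) and m[k] == 0:
--         k += 1
--     return k
--
-- def check_rect(map):
--     leads = [_lead(m) for m in map]
--     least = min(leads)
--     if any(0 in m[k:] for m, k in zip(map, leads)) or any(k != least for k in leads):
--         return 3
--     rows = len(map)
--     widths = [len(m) - least for m in map]
--     if max(widths) == min(widths):
--         return 1 if any(w != rows for w in widths) else 2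
--     return 3
-- ===== Notes on version B (the rewrite author's own statement) =====
-- stated objective: faster
-- what changed: Instead of A's per-row while-loop that re-sums the whole suffix m[index:] at every step (quadratic per row) and then materialises a trimmed tuple-of-tuples to scan for zeros, B counts each row's leading zeros in one linear pass and classifies directly from those counts and the row lengths, never building the trimmed grid.
import Mathlib
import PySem

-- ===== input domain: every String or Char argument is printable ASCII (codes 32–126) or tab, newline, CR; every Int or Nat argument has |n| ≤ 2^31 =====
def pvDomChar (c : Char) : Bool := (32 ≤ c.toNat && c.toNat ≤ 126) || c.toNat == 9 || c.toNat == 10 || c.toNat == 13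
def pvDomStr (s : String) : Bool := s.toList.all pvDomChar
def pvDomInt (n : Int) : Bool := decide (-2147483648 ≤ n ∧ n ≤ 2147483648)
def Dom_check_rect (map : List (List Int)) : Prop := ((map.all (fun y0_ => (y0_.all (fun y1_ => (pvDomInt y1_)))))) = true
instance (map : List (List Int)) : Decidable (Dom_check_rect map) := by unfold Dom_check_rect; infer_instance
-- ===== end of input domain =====

-- B replaces A's repeated suffix re-summing and trimmed-tuple rebuilding with one
-- linear pass per row (count leading zeros, check zeros once): alternative, faster algorithm.

-- ===== PORT A =====
-- A's inner 'while sum(m[index:]) == sum(m): index += 1' loop; fuel makes it total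
-- (the fuel branch is unreachable under Pre_, where Python's loop terminates).
-- m[index:] with a nonnegative int index is exactly List.drop.
def pvLoopA (m : List Int) : Nat → Nat → Int
  | 0, index => (index : Int)
  | fuel + 1, index =>
      if (m.drop index).sum = m.sum then pvLoopA m fuel (index + 1) else (index : Int)

def remove_excess (map : List (List Int)) : List (List Int) :=
  let leasts := map.map (fun m => pvLoopA m (m.length + 2) 0 - 1)
  -- Python's min raises ValueError on []; Pre_ excludes the empty map, getD 0 is never used there
  let least := (PySem.List.min? leasts (fun x => x)).getD 0
  map.map (fun m => PySem.List.slice m (some least) none)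

def check_rect (map : List (List Int)) : Int :=
  let mp := remove_excess map
  let size_map : Int := mp.length
  let sizes := mp.map (fun m => (m.length : Int))
  if mp.any (fun m => decide (0 ∈ m)) then 3
  else if (PySem.List.max? sizes (fun x => x)).getD 0 = (PySem.List.min? sizes (fun x => x)).getD 0 then
    if sizes.any (fun s => decide (s ≠ size_map)) then 1 else 2
  else 3

-- ===== PORT B =====
-- Source B's _lead: while k < len(m) and m[k] == 0: k += 1
def pvLead : List Int → Nat
  | [] => 0
  | x :: xs => if x = 0 then pvLead xs + 1 else 0

def check_rect_alt (map : List (List Int)) : Int :=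
  let leads := map.map pvLead
  let least := (PySem.List.min? leads (fun x => x)).getD 0
  if (map.zip leads).any (fun p => decide (0 ∈ p.1.drop p.2))
     || leads.any (fun k => decide (k ≠ least)) then 3
  else
    let rows : Int := map.length
    let widths := map.map (fun m => (m.length : Int) - (least : Int))
    if (PySem.List.max? widths (fun x => x)).getD 0 = (PySem.List.min? widths (fun x => x)).getD 0 then
      if widths.any (fun w => decide (w ≠ rows)) then 1 else 2
    else 3

-- ===== PRECONDITION & SPEC =====
-- Pre_ excludes exactly the inputs where Python A does not return: the empty map
-- (min([]) raises ValueError) and any all-zero row (A's while loop never terminates).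
def Pre_check_rect (map : List (List Int)) : Prop :=
  map ≠ [] ∧ ∀ m ∈ map, ∃ x ∈ m, x ≠ 0
instance (map : List (List Int)) : Decidable (Pre_check_rect map) := by
  unfold Pre_check_rect; infer_instance

def pvWitness_check_rect : List (List Int) := [[0, 1], [2, 3]]

def Spec_check_rect (map : List (List Int)) (out : Int) : Prop := out = check_rect_alt map
instance (map : List (List Int)) (out : Int) : Decidable (Spec_check_rect map out) := by
  unfold Spec_check_rect; infer_instance

-- ===== CLAIM (what is proved, stated in full; the proofs are below) =====
def Claim_equal_check_rect : Prop :=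
  ∀ (map : List (List Int)), Dom_check_rect map → Pre_check_rect map →
    Spec_check_rect map (check_rect map)

-- ===== LEMMAS AND PROOFS =====

theorem pvLead_le_length (m : List Int) : pvLead m ≤ m.length := by
  induction m with
  | nil => simp [pvLead]
  | cons x xs ih => by_cases h : x = 0 <;> simp [pvLead, h] <;> omega

theorem pvLead_lt_length (m : List Int) (h : ∃ x ∈ m, x ≠ 0) : pvLead m < m.length := by
  induction m with
  | nil => simp at h
  | cons x xs ih =>
      by_cases hx : x = 0
      · simp [pvLead, hx]
        apply ih
        rcases h with ⟨y, hy, hy0⟩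
        simp at hy
        rcases hy with hy | hy
        · exact absurd (hy ▸ hx) hy0
        · exact ⟨y, hy, hy0⟩
      · simp [pvLead, hx]

theorem sum_take_le_lead (m : List Int) (i : Nat) (hi : i ≤ pvLead m) : (m.take i).sum = 0 := by
  induction m generalizing i with
  | nil => simp
  | cons x xs ih =>
      cases i with
      | zero => simp
      | succ j =>
          by_cases hx : x = 0
          · simp [pvLead, hx] at hi
            simp [List.take_succ_cons, hx, ih j (by omega)]
          · simp [pvLead, hx] at hi
  
theorem sum_take_lead_succ (m : List Int) (h : pvLead m < m.length) :
    (m.take (pvLead m + 1)).sum ≠ 0 := by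
  induction m with
  | nil => simp at h
  | cons x xs ih =>
      by_cases hx : x = 0
      · simp only [pvLead, if_pos hx]
        simp [List.take_succ_cons, hx]
        apply ih
        simp [pvLead, hx] at h
        omega
      · simp [pvLead, hx]

theorem pvLoopA_eq (m : List Int) (hne : ∃ x ∈ m, x ≠ 0) :
    ∀ (fuel index : Nat), index ≤ pvLead m + 1 → pvLead m + 1 < index + fuel →
      pvLoopA m fuel index = (pvLead m : Int) + 1 := by
  intro fuel
  induction fuel with
  | zero => intro index h1 h2; omega
  | succ f ih =>
      intro index h1 h2
      have hsplit : (m.take index).sum + (m.drop index).sum = m.sum := by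
        rw [← List.sum_append, List.take_append_drop]
      by_cases hc : index ≤ pvLead m
      · have ht : (m.take index).sum = 0 := sum_take_le_lead m index hc
        have : (m.drop index).sum = m.sum := by omega
        simp only [pvLoopA, if_pos this]
        exact ih (index + 1) (by omega) (by omega)
      · have hidx : index = pvLead m + 1 := by omega
        have ht : (m.take index).sum ≠ 0 := by
          rw [hidx]; exact sum_take_lead_succ m (pvLead_lt_length m hne)
        have : ¬ (m.drop index).sum = m.sum := by omega
        simp only [pvLoopA, if_neg this]
        subst hidx; push_cast; ring

theorem foldl_min_cast (x : Nat) (t : List Nat) :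
    (t.map Nat.cast).foldl min (x : Int) = ((t.foldl min x : Nat) : Int) := by
  induction t generalizing x with
  | nil => rfl
  | cons y ys ih =>
      simp only [List.map_cons, List.foldl_cons, ← Nat.cast_min]
      exact ih (min x y)

theorem getElem_lt_lead (m : List Int) (i : Nat) (hi : i < pvLead m)
    (hl : i < m.length) : m[i] = 0 := by
  induction m generalizing i with
  | nil => simp at hl
  | cons x xs ih =>
      by_cases hx : x = 0
      · cases i with
        | zero => simpa using hx
        | succ j =>
            simp only [pvLead, if_pos hx] at hi
            simpa using ih j (by omega) (by simpa using hl)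
      · simp [pvLead, hx] at hi

theorem zip_map_self {α β : Type} (l : List α) (g : α → β) :
    l.zip (l.map g) = l.map (fun x => (x, g x)) := by
  induction l with
  | nil => rfl
  | cons x xs ih => simp [ih]

-- per-row zero-membership decomposition
theorem mem_drop_least_iff (m : List Int) (ℓ : Nat) (hle : ℓ ≤ pvLead m)
    (hlt : pvLead m < m.length) :
    0 ∈ m.drop ℓ ↔ (0 ∈ m.drop (pvLead m) ∨ ℓ < pvLead m) := by
  constructor
  · intro h
    by_cases he : ℓ = pvLead m
    · exact Or.inl (he ▸ h)
    · exact Or.inr (by omega)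
  · intro h
    rcases h with h | h
    · have : m.drop (pvLead m) = (m.drop ℓ).drop (pvLead m - ℓ) := by
        rw [List.drop_drop]; congr 1; omega
      rw [this] at h
      exact List.mem_of_mem_drop h
    · have hz : m[ℓ] = 0 := getElem_lt_lead m ℓ h (by omega)
      have hlen : ℓ < m.length := by omega
      rw [List.drop_eq_getElem_cons hlen, hz]
      exact List.mem_cons_self

-- ===== VERDICT (by name: the statement is the Claim_ definition above) =====
theorem check_rect_spec : Claim_equal_check_rect := by
  intro map hdom hpre
  obtain ⟨hne, hall⟩ := hpre
  unfold Spec_check_rect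
  obtain ⟨a, t, rfl⟩ := List.exists_cons_of_ne_nil hne
  -- 1. A's per-row loop computes pvLead m + 1
  have hleads : (a :: t).map (fun m => pvLoopA m (m.length + 2) 0 - 1)
      = (a :: t).map (fun m => ((pvLead m : Nat) : Int)) := by
    apply List.map_congr_left
    intro m hm
    have h1 := pvLoopA_eq m (hall m hm) (m.length + 2) 0 (by omega)
      (by have := pvLead_le_length m; omega)
    rw [h1]; ring
  -- 2. both minima are the same number N
  set N : Nat := (t.map pvLead).foldl min (pvLead a) with hN
  have hminB : PySem.List.min? ((a :: t).map pvLead) (fun x => x) = some N := by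
    rw [List.map_cons]; exact PySem.List.min?_id_cons _ _
  have hminA : PySem.List.min? ((a :: t).map (fun m => ((pvLead m : Nat) : Int))) (fun x => x)
      = some ((N : Nat) : Int) := by
    rw [List.map_cons, PySem.List.min?_id_cons]
    congr 1
    have : t.map (fun m => ((pvLead m : Nat) : Int)) = (t.map pvLead).map Nat.cast := by
      simp [List.map_map]
    rw [this, foldl_min_cast]
  -- 3. N is a lower bound of the leads
  have hle : ∀ m ∈ (a :: t), N ≤ pvLead m := by
    intro m hm
    exact PySem.List.min?_isMin hminB (pvLead m) (List.mem_map_of_mem hm)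
  have hltlen : ∀ m ∈ (a :: t), pvLead m < m.length := fun m hm =>
    pvLead_lt_length m (hall m hm)
  -- 4. the trimmed grid is map.map (·.drop N)
  have htrim : remove_excess (a :: t) = (a :: t).map (fun m => m.drop N) := by
    unfold remove_excess
    simp only [hleads, hminA, Option.getD_some]
    apply List.map_congr_left
    intro m _
    exact PySem.List.slice_from_natCast m N
  -- 5. the zero checks agree
  have hZ : (((a :: t).map (fun m => m.drop N)).any (fun m => decide (0 ∈ m)))
      = ((((a :: t).zip ((a :: t).map pvLead)).any (fun p => decide (0 ∈ p.1.drop p.2)))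
         || ((a :: t).map pvLead).any (fun k => decide (k ≠ N))) := by
    rw [zip_map_self]
    rw [Bool.eq_iff_iff]
    simp only [List.any_map, List.any_eq_true, Function.comp, decide_eq_true_eq,
      Bool.or_eq_true]
    constructor
    · rintro ⟨m, hm, hz⟩
      rcases (mem_drop_least_iff m N (hle m hm) (hltlen m hm)).mp hz with h | h
      · exact Or.inl ⟨m, hm, h⟩
      · exact Or.inr ⟨m, hm, by omega⟩
    · rintro (⟨m, hm, hz⟩ | ⟨m, hm, hk⟩)
      · exact ⟨m, hm, (mem_drop_least_iff m N (hle m hm) (hltlen m hm)).mpr (Or.inl hz)⟩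
      · refine ⟨m, hm, (mem_drop_least_iff m N (hle m hm) (hltlen m hm)).mpr (Or.inr ?_)⟩
        have := hle m hm; omega
  -- 6. trimmed sizes are the widths
  have hsz : (((a :: t).map (fun m => m.drop N)).map (fun m => ((m.length : Nat) : Int)))
      = (a :: t).map (fun m => (m.length : Int) - ((N : Nat) : Int)) := by
    rw [List.map_map]
    apply List.map_congr_left
    intro m hm
    have h1 : N ≤ m.length := le_trans (hle m hm) (le_of_lt (hltlen m hm))
    simp only [Function.comp, List.length_drop]
    omega
  simp only [check_rect, check_rect_alt, htrim, hminB, Option.getD_some, hZ, hsz,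
    List.length_map]
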